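-- pv_equiv track=rewrite | github.com/greenisagoodcolor/FreeAgentics | infrastructure/hardware/hal_core.py | _categorize_operation
-- ===== SOURCE A (Python) =====
-- def _categorize_operation(operation: str) -> str:
--     """Categorize an operation for routing"""
--     operation_lower = operation.lower()
--
--     if any(
--         term in operation_lower for term in [
--             "compute",
--             "calculate",
--             "process",
--             "infer"]):
--         return "compute"
--     elif any(term in operation_lower for term in ["store", "save", "write", "cache"]):
--         return "store"
--     elif any(term in operation_lower for term in ["network", "send", "receive", "transfer"]):
--         return "network"
--     elif any(term in operation_lower for term in ["sense", "measure", "detect"]):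
--         return "sense"
--     else:
--         return "compute"  # Default to compute
-- ===== SOURCE B (Python) =====
-- _KEYWORDS = [
--     ("compute", 0), ("calculate", 0), ("process", 0), ("infer", 0),
--     ("store", 1), ("save", 1), ("write", 1), ("cache", 1),
--     ("network", 2), ("send", 2), ("receive", 2), ("transfer", 2),
--     ("sense", 3), ("measure", 3), ("detect", 3),
-- ]
-- _NAMES = ["compute", "store", "network", "sense"]
--
-- def _categorize_operation(operation: str) -> str:
--     """Single positional scan: match every keyword at every index, keep the
--     minimum category rank seen, then map the best rank to its category."""
--     s = operation.lower()
--     best = 4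
--     for i in range(len(s)):
--         for kw, rank in _KEYWORDS:
--             if rank < best and s.startswith(kw, i):
--                 best = rank
--     return _NAMES[best] if best < 4 else "compute"
-- ===== Notes on version B (the rewrite author's own statement) =====
-- stated objective: alternative
-- what changed: B makes a single left-to-right positional scan of the lowered string, matching all 15 keywords at each index into a minimum-category-rank accumulator and mapping the final rank to its category, instead of A's four staged any-substring membership tests.
import Mathlib
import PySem

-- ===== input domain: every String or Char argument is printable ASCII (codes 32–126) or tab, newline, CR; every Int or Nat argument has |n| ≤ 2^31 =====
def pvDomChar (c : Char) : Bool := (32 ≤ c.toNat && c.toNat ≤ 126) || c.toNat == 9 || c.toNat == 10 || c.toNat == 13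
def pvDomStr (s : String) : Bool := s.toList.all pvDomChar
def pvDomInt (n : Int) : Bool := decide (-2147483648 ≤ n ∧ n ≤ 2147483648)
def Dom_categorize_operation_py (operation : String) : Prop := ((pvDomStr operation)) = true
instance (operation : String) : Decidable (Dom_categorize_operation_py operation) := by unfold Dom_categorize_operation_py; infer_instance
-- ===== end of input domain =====

-- B replaces A's four staged any-substring tests by one positional scan of the lowered
-- string with a min-category-rank accumulator; same return value on every input.

-- ===== PORT A =====
def categorize_operation_py (operation : String) : String :=
  let operation_lower := PySem.Str.lower operation
  if (["compute", "calculate", "process", "infer"].any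
      (fun term => PySem.Str.isIn term operation_lower)) then "compute"
  else if (["store", "save", "write", "cache"].any
      (fun term => PySem.Str.isIn term operation_lower)) then "store"
  else if (["network", "send", "receive", "transfer"].any
      (fun term => PySem.Str.isIn term operation_lower)) then "network"
  else if (["sense", "measure", "detect"].any
      (fun term => PySem.Str.isIn term operation_lower)) then "sense"
  else "compute"

-- ===== PORT B =====
def pvKeywordRanks : List (String × Nat) :=
  [("compute", 0), ("calculate", 0), ("process", 0), ("infer", 0),
   ("store", 1), ("save", 1), ("write", 1), ("cache", 1),
   ("network", 2), ("send", 2), ("receive", 2), ("transfer", 2),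
   ("sense", 3), ("measure", 3), ("detect", 3)]

def pvRankNames : List String := ["compute", "store", "network", "sense"]

def categorize_operation_py_alt (operation : String) : String :=
  let s := PySem.Str.lower operation
  -- for i in range(len(s)): for kw, rank in _KEYWORDS: if rank < best and s.startswith(kw, i): best = rank
  -- (s.startswith(kw, i) with 0 ≤ i is exactly a prefix test on the i-th suffix)
  let best := (List.range s.toList.length).foldl
    (fun best i => pvKeywordRanks.foldl
      (fun best kr =>
        if kr.2 < best ∧ PySem.Chars.startswith (s.toList.drop i) kr.1.toList then kr.2 else best)
      best) 4
  -- _NAMES[best] if best < 4 else "compute"   (getD = in-range list indexing under the guard)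
  if best < 4 then pvRankNames.getD best "compute" else "compute"

-- ===== PRECONDITION & SPEC =====
def Spec_categorize_operation_py (operation : String) (out : String) : Prop := out = categorize_operation_py_alt operation
instance (operation : String) (out : String) : Decidable (Spec_categorize_operation_py operation out) := by unfold Spec_categorize_operation_py; infer_instance

-- ===== CLAIM (what is proved, stated in full; the proofs are below) =====
def Claim_equal_categorize_operation_py : Prop := ∀ (operation : String), Dom_categorize_operation_py operation → Spec_categorize_operation_py operation (categorize_operation_py operation)

-- ===== LEMMAS AND PROOFS =====

-- flatten the nested loop into one fold over (index, keyword) pairs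
theorem pvFoldl_nested_flatMap {α β γ : Type} (l : List α) (ks : List β)
    (g : γ → α → β → γ) (b : γ) :
    l.foldl (fun b i => ks.foldl (fun b k => g b i k) b) b
      = (l.flatMap (fun i => ks.map (fun k => (i, k)))).foldl (fun b p => g b p.1 p.2) b := by
  induction l generalizing b with
  | nil => rfl
  | cons x xs ih => simp [List.flatMap_cons, List.foldl_append, List.foldl_map, ih]

-- the guarded-update fold is a min-fold over the matching elements
theorem pvFoldl_if_lt_eq_filter_min {β : Type} (l : List β) (v : β → Nat) (c : β → Bool) (b : Nat) :
    l.foldl (fun b x => if v x < b ∧ c x = true then v x else b) b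
      = (l.filter c).foldl (fun b x => min b (v x)) b := by
  induction l generalizing b with
  | nil => rfl
  | cons x xs ih =>
    by_cases hc : c x = true
    · have h1 : (if v x < b ∧ c x = true then v x else b) = min b (v x) := by
        rcases Nat.lt_or_ge (v x) b with h | h
        · simp [h, hc, Nat.min_eq_right h.le]
        · simp [Nat.not_lt.mpr h, Nat.min_eq_left h]
      simp only [List.foldl_cons, List.filter_cons, hc, if_true, and_true]
      rw [show (if v x < b then v x else b) = min b (v x) by
            rcases Nat.lt_or_ge (v x) b with h | h
            · simp [h, Nat.min_eq_right h.le]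
            · simp [Nat.not_lt.mpr h, Nat.min_eq_left h],
          ih]
    · simp only [List.foldl_cons, List.filter_cons, hc, ih, Bool.false_eq_true, and_false, if_false]

theorem pvFoldl_min_le_init {β : Type} (l : List β) (v : β → Nat) (b : Nat) :
    l.foldl (fun b x => min b (v x)) b ≤ b := by
  induction l generalizing b with
  | nil => simp
  | cons x xs ih => exact le_trans (ih (min b (v x))) (Nat.min_le_left _ _)

theorem pvFoldl_min_le_mem {β : Type} (l : List β) (v : β → Nat) (b : Nat)
    {x : β} (hx : x ∈ l) : l.foldl (fun b x => min b (v x)) b ≤ v x := by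
  induction l generalizing b with
  | nil => cases hx
  | cons y ys ih =>
    rcases List.mem_cons.mp hx with h | h
    · subst h
      exact le_trans (pvFoldl_min_le_init ys v _) (Nat.min_le_right _ _)
    · exact ih _ h

theorem pvFoldl_min_mem_or {β : Type} (l : List β) (v : β → Nat) (b : Nat) :
    l.foldl (fun b x => min b (v x)) b = b ∨ ∃ x ∈ l, l.foldl (fun b x => min b (v x)) b = v x := by
  induction l generalizing b with
  | nil => exact Or.inl rfl
  | cons x xs ih =>
    rcases ih (min b (v x)) with h | ⟨y, hy, hv⟩
    · rcases Nat.le_total b (v x) with he | he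
      · exact Or.inl (by simpa [Nat.min_eq_left he] using h)
      · exact Or.inr ⟨x, List.mem_cons_self .., by simpa [Nat.min_eq_right he] using h⟩
    · exact Or.inr ⟨y, List.mem_cons_of_mem _ hy, hv⟩

-- a nonempty keyword is a substring of t iff it starts at some scanned index
theorem pvExists_startswith_iff (t kw : List Char) (hk : kw ≠ []) :
    (∃ i ∈ List.range t.length, PySem.Chars.startswith (t.drop i) kw = true)
      ↔ PySem.Chars.isIn kw t = true := by
  constructor
  · rintro ⟨i, _, h⟩
    exact (PySem.Chars.exists_prefix_drop_iff_isIn kw t).mp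
      ⟨i, (PySem.Chars.startswith_iff _ _).mp h⟩
  · intro h
    obtain ⟨j, hp⟩ := (PySem.Chars.exists_prefix_drop_iff_isIn kw t).mpr h
    have hj : j < t.length := by
      by_contra hge
      have hnil : t.drop j = [] := List.drop_eq_nil_of_le (Nat.le_of_not_lt hge)
      exact hk (List.prefix_nil.mp (hnil ▸ hp))
    exact ⟨j, List.mem_range.mpr hj, (PySem.Chars.startswith_iff _ _).mpr hp⟩

-- ===== VERDICT (by name: the statement is the Claim_ definition above) =====
theorem categorize_operation_py_spec : Claim_equal_categorize_operation_py := by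
  intro operation _
  unfold Spec_categorize_operation_py
  simp only [categorize_operation_py, categorize_operation_py_alt, PySem.Str.isIn_eq]
  generalize PySem.Str.lower operation = s
  set t := s.toList with ht
  rw [pvFoldl_nested_flatMap (List.range t.length) pvKeywordRanks
      (fun b i k => if k.2 < b ∧ PySem.Chars.startswith (t.drop i) k.1.toList then k.2 else b) 4]
  rw [pvFoldl_if_lt_eq_filter_min _ (fun p => p.2.2)
      (fun p : Nat × (String × Nat) => PySem.Chars.startswith (t.drop p.1) p.2.1.toList) 4]
  set F := ((List.range t.length).flatMap (fun i => pvKeywordRanks.map (fun k => (i, k)))).filter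
      (fun p : Nat × (String × Nat) => PySem.Chars.startswith (t.drop p.1) p.2.1.toList) with hF
  set best := F.foldl (fun b p => min b p.2.2) 4 with hbest
  -- every matched pair is a table entry whose keyword occurs in t
  have hsound : ∀ p ∈ F, p.2 ∈ pvKeywordRanks ∧ PySem.Chars.isIn p.2.1.toList t = true := by
    intro p hp
    have hp' := List.mem_filter.mp hp
    obtain ⟨i, hi, hmap⟩ := List.mem_flatMap.mp hp'.1
    obtain ⟨k, hk, rfl⟩ := List.mem_map.mp hmap
    exact ⟨hk, (PySem.Chars.exists_prefix_drop_iff_isIn _ _).mp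
      ⟨i, (PySem.Chars.startswith_iff _ _).mp hp'.2⟩⟩
  have hne : ∀ q ∈ pvKeywordRanks, q.1.toList ≠ [] := by decide
  -- every table keyword occurring in t yields a matched pair
  have hcomplete : ∀ kw r, (kw, r) ∈ pvKeywordRanks → PySem.Chars.isIn kw.toList t = true →
      ∃ p ∈ F, p.2 = (kw, r) := by
    intro kw r hkr hin
    obtain ⟨i, hi, hsw⟩ := (pvExists_startswith_iff t kw.toList (hne _ hkr)).mpr hin
    exact ⟨(i, (kw, r)), List.mem_filter.mpr
      ⟨List.mem_flatMap.mpr ⟨i, hi, List.mem_map.mpr ⟨(kw, r), hkr, rfl⟩⟩, hsw⟩, rfl⟩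
  have hgrp : ∀ (r : Nat) (kws : List String), (∀ kw ∈ kws, (kw, r) ∈ pvKeywordRanks) →
      kws.any (fun term => PySem.Chars.isIn term.toList t) = true → ∃ p ∈ F, p.2.2 = r := by
    intro r kws hsub hany
    obtain ⟨kw, hkwmem, hin⟩ := List.any_eq_true.mp hany
    obtain ⟨p, hp, hpe⟩ := hcomplete kw r (hsub kw hkwmem) hin
    exact ⟨p, hp, by rw [hpe]⟩
  have htab : ∀ q ∈ pvKeywordRanks, q.2 < 4 ∧
      (q.2 = 0 → q.1 ∈ ["compute", "calculate", "process", "infer"]) ∧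
      (q.2 = 1 → q.1 ∈ ["store", "save", "write", "cache"]) ∧
      (q.2 = 2 → q.1 ∈ ["network", "send", "receive", "transfer"]) ∧
      (q.2 = 3 → q.1 ∈ ["sense", "measure", "detect"]) := by decide
  by_cases hb0 : (["compute", "calculate", "process", "infer"].any
      (fun term => PySem.Chars.isIn term.toList t)) = true
  · obtain ⟨p, hp, hpr⟩ := hgrp 0 _ (by decide) hb0
    have h1 : best ≤ 0 := hpr ▸ pvFoldl_min_le_mem F (fun p => p.2.2) 4 hp
    have h2 : best = 0 := Nat.le_zero.mp h1
    rw [if_pos hb0, h2]; simp [pvRankNames]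
  · by_cases hb1 : (["store", "save", "write", "cache"].any
        (fun term => PySem.Chars.isIn term.toList t)) = true
    · obtain ⟨p, hp, hpr⟩ := hgrp 1 _ (by decide) hb1
      have h1 : best ≤ 1 := hpr ▸ pvFoldl_min_le_mem F (fun p => p.2.2) 4 hp
      rcases pvFoldl_min_mem_or F (fun p => p.2.2) 4 with h4 | ⟨q, hq, hv⟩
      · rw [← hbest] at h4; omega
      · obtain ⟨hqmem, hqin⟩ := hsound q hq
        have hr0 : q.2.2 ≠ 0 := fun h0 =>
          hb0 (List.any_eq_true.mpr ⟨q.2.1, ((htab _ hqmem).2.1 h0), hqin⟩)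
        rw [← hbest] at hv
        have h2 : best = 1 := by omega
        rw [if_neg hb0, if_pos hb1, h2]; simp [pvRankNames]
    · by_cases hb2 : (["network", "send", "receive", "transfer"].any
          (fun term => PySem.Chars.isIn term.toList t)) = true
      · obtain ⟨p, hp, hpr⟩ := hgrp 2 _ (by decide) hb2
        have h1 : best ≤ 2 := hpr ▸ pvFoldl_min_le_mem F (fun p => p.2.2) 4 hp
        rcases pvFoldl_min_mem_or F (fun p => p.2.2) 4 with h4 | ⟨q, hq, hv⟩
        · rw [← hbest] at h4; omega
        · obtain ⟨hqmem, hqin⟩ := hsound q hq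
          have hr0 : q.2.2 ≠ 0 := fun h0 =>
            hb0 (List.any_eq_true.mpr ⟨q.2.1, ((htab _ hqmem).2.1 h0), hqin⟩)
          have hr1 : q.2.2 ≠ 1 := fun h0 =>
            hb1 (List.any_eq_true.mpr ⟨q.2.1, ((htab _ hqmem).2.2.1 h0), hqin⟩)
          rw [← hbest] at hv
          have h2 : best = 2 := by omega
          rw [if_neg hb0, if_neg hb1, if_pos hb2, h2]; simp [pvRankNames]
      · by_cases hb3 : (["sense", "measure", "detect"].any
            (fun term => PySem.Chars.isIn term.toList t)) = true
        · obtain ⟨p, hp, hpr⟩ := hgrp 3 _ (by decide) hb3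
          have h1 : best ≤ 3 := hpr ▸ pvFoldl_min_le_mem F (fun p => p.2.2) 4 hp
          rcases pvFoldl_min_mem_or F (fun p => p.2.2) 4 with h4 | ⟨q, hq, hv⟩
          · rw [← hbest] at h4; omega
          · obtain ⟨hqmem, hqin⟩ := hsound q hq
            have hr0 : q.2.2 ≠ 0 := fun h0 =>
              hb0 (List.any_eq_true.mpr ⟨q.2.1, ((htab _ hqmem).2.1 h0), hqin⟩)
            have hr1 : q.2.2 ≠ 1 := fun h0 =>
              hb1 (List.any_eq_true.mpr ⟨q.2.1, ((htab _ hqmem).2.2.1 h0), hqin⟩)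
            have hr2 : q.2.2 ≠ 2 := fun h0 =>
              hb2 (List.any_eq_true.mpr ⟨q.2.1, ((htab _ hqmem).2.2.2.1 h0), hqin⟩)
            rw [← hbest] at hv
            have h2 : best = 3 := by omega
            rw [if_neg hb0, if_neg hb1, if_neg hb2, if_pos hb3, h2]; simp [pvRankNames]
        · rcases pvFoldl_min_mem_or F (fun p => p.2.2) 4 with h4 | ⟨q, hq, hv⟩
          · rw [← hbest] at h4
            rw [if_neg hb0, if_neg hb1, if_neg hb2, if_neg hb3, h4]; simp
          · obtain ⟨hqmem, hqin⟩ := hsound q hq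
            obtain ⟨hlt, ht0, ht1, ht2, ht3⟩ := htab _ hqmem
            interval_cases h : q.2.2
            · exact absurd (List.any_eq_true.mpr ⟨q.2.1, ht0 rfl, hqin⟩) hb0
            · exact absurd (List.any_eq_true.mpr ⟨q.2.1, ht1 rfl, hqin⟩) hb1
            · exact absurd (List.any_eq_true.mpr ⟨q.2.1, ht2 rfl, hqin⟩) hb2
            · exact absurd (List.any_eq_true.mpr ⟨q.2.1, ht3 rfl, hqin⟩) hb3
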